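-- pv_equiv track=rewrite | github.com/hbm99/bfair | bfair/sensors/optimization.py | compute_errors
-- ===== SOURCE A (Python) =====
-- def compute_errors(y_test, y_pred, attributes):
--     ir_counter = {}
--     for value in attributes:
--         correct_hit = 0
--         spurious = 0
--         missing = 0
--         correct_rejection = 0
--
--         # if true_ann or pred_ann contains values not in attributes, errors are not detected.
--         for true_ann, pred_ann in zip(y_test, y_pred):
--             if value in true_ann and value not in pred_ann:
--                 missing += 1
--             elif value in pred_ann and value not in true_ann:
--                 spurious += 1
--             elif value in true_ann:
--                 correct_hit += 1
--             else:
--                 correct_rejection += 1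
--
--         ir_counter[value] = (correct_hit, spurious, missing, correct_rejection)
--
--     ac_counter = {}
--     for true_ann, pred_ann in zip(y_test, y_pred):
--         true_ann = frozenset(true_ann)
--         pred_ann = frozenset(pred_ann)
--
--         correct, total = ac_counter.get(true_ann, (0, 0))
--         equal = int(true_ann == pred_ann)
--         ac_counter[true_ann] = (correct + equal, total + 1)
--
--     return ir_counter, ac_counter
-- ===== SOURCE B (Python) =====
-- def compute_errors(y_test, y_pred, attributes):
--     n = 0
--     stats = {}  # value -> (hit, spurious, missing); only values that actually occur
--     ac_counter = {}
--     for true_ann, pred_ann in zip(y_test, y_pred):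
--         n += 1
--         ts = frozenset(true_ann)
--         ps = frozenset(pred_ann)
--         for v in ts | ps:
--             h, s, m = stats.get(v, (0, 0, 0))
--             if v in ts and v in ps:
--                 h += 1
--             elif v in ps:
--                 s += 1
--             else:
--                 m += 1
--             stats[v] = (h, s, m)
--         c, t = ac_counter.get(ts, (0, 0))
--         ac_counter[ts] = (c + (1 if ts == ps else 0), t + 1)
--     ir_counter = {}
--     for value in attributes:
--         h, s, m = stats.get(value, (0, 0, 0))
--         ir_counter[value] = (h, s, m, n - h - s - m)
--     return ir_counter, ac_counter
-- ===== Notes on version B (the rewrite author's own statement) =====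
-- stated objective: faster
-- what changed: One pass over the samples counting hits/spurious/missing only for values actually present in each sample (plus the exact-match counts in the same pass), then per attribute correct_rejection = N - hit - spurious - missing, instead of re-scanning all samples once per attribute.
import Mathlib
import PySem

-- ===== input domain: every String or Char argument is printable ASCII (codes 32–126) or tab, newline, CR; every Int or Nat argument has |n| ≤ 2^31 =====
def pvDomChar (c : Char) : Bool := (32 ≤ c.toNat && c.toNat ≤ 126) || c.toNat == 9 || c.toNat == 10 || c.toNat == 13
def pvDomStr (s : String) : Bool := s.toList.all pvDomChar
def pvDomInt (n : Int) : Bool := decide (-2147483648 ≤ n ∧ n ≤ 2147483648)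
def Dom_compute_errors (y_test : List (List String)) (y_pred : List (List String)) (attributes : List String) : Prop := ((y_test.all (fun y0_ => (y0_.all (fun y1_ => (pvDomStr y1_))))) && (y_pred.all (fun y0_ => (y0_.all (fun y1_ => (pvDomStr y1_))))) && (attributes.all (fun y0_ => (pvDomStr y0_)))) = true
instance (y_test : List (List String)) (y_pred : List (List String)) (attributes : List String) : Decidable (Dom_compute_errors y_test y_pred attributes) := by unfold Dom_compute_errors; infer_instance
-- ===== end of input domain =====

-- B replaces A's per-attribute rescan of all samples by ONE pass over the samples that counts only values
-- actually present in a sample, recovering correct_rejection as N - hit - spurious - missing (objective: faster).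

-- ===== PORT A =====
-- Key encoding of Python's `frozenset(l)` used as a dict key: its distinct elements in sorted order, so that
-- Lean list equality of keys coincides exactly with Python frozenset equality (exact on the stated domain).
def pvCanon (l : List String) : List String :=
  PySem.List.sorted (PySem.Set.ofList l) (fun x => x) false

def compute_errors (y_test : List (List String)) (y_pred : List (List String)) (attributes : List String) : (List (String × Int × Int × Int × Int)) × (List (List String × Int × Int)) :=
  let pairs := y_test.zip y_pred
  let ir_counter := attributes.foldl (fun (d : PySem.Dict String (Int × Int × Int × Int)) v =>
      let c := pairs.foldl (fun (acc : Int × Int × Int × Int) tp =>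
          if v ∈ tp.1 ∧ v ∉ tp.2 then (acc.1, acc.2.1, acc.2.2.1 + 1, acc.2.2.2)
          else if v ∈ tp.2 ∧ v ∉ tp.1 then (acc.1, acc.2.1 + 1, acc.2.2.1, acc.2.2.2)
          else if v ∈ tp.1 then (acc.1 + 1, acc.2.1, acc.2.2.1, acc.2.2.2)
          else (acc.1, acc.2.1, acc.2.2.1, acc.2.2.2 + 1)) (0, 0, 0, 0)
      d.insert v c) PySem.Dict.empty
  let ac_counter := pairs.foldl (fun (d : PySem.Dict (List String) (Int × Int)) tp =>
      let ts := pvCanon tp.1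
      let ps := pvCanon tp.2
      let ct := d.getD ts (0, 0)
      d.insert ts (ct.1 + (if ts = ps then 1 else 0), ct.2 + 1)) PySem.Dict.empty
  (ir_counter.items, ac_counter.items)

-- ===== PORT B =====
-- B's single per-sample loop body (Source B's `for true_ann, pred_ann in zip(...)` body): bump the stats of the
-- values present in the sample, count the sample, and do the exact-match bookkeeping, in one pass.
def pvBStep (acc : Int × PySem.Dict String (Int × Int × Int) × PySem.Dict (List String) (Int × Int))
    (tp : List String × List String) :
    Int × PySem.Dict String (Int × Int × Int) × PySem.Dict (List String) (Int × Int) :=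
  let ts := PySem.Set.ofList tp.1
  let ps := PySem.Set.ofList tp.2
  let stats := (PySem.Set.union ts ps).foldl (fun d v =>
      let hsm := d.getD v (0, 0, 0)
      d.insert v (if v ∈ ts ∧ v ∈ ps then (hsm.1 + 1, hsm.2.1, hsm.2.2)
                  else if v ∈ ps then (hsm.1, hsm.2.1 + 1, hsm.2.2)
                  else (hsm.1, hsm.2.1, hsm.2.2 + 1))) acc.2.1
  let tsk := pvCanon tp.1
  let psk := pvCanon tp.2
  let ct := acc.2.2.getD tsk (0, 0)
  (acc.1 + 1, stats, acc.2.2.insert tsk (ct.1 + (if tsk = psk then 1 else 0), ct.2 + 1))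

def compute_errors_alt (y_test : List (List String)) (y_pred : List (List String)) (attributes : List String) : (List (String × Int × Int × Int × Int)) × (List (List String × Int × Int)) :=
  let fin := (y_test.zip y_pred).foldl pvBStep (0, PySem.Dict.empty, PySem.Dict.empty)
  let ir_counter := attributes.foldl (fun (d : PySem.Dict String (Int × Int × Int × Int)) v =>
      let hsm := fin.2.1.getD v (0, 0, 0)
      d.insert v (hsm.1, hsm.2.1, hsm.2.2, fin.1 - hsm.1 - hsm.2.1 - hsm.2.2)) PySem.Dict.empty
  (ir_counter.items, fin.2.2.items)

-- ===== PRECONDITION & SPEC =====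
def Spec_compute_errors (y_test : List (List String)) (y_pred : List (List String)) (attributes : List String) (out : (List (String × Int × Int × Int × Int)) × (List (List String × Int × Int))) : Prop := out = compute_errors_alt y_test y_pred attributes
instance (y_test : List (List String)) (y_pred : List (List String)) (attributes : List String) (out : (List (String × Int × Int × Int × Int)) × (List (List String × Int × Int))) : Decidable (Spec_compute_errors y_test y_pred attributes out) := by unfold Spec_compute_errors; infer_instance

-- ===== CLAIM (what is proved, stated in full; the proofs are below) =====
def Claim_equal_compute_errors : Prop := ∀ (y_test : List (List String)) (y_pred : List (List String)) (attributes : List String), Dom_compute_errors y_test y_pred attributes → Spec_compute_errors y_test y_pred attributes (compute_errors y_test y_pred attributes)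

-- ===== LEMMAS AND PROOFS =====

-- the four mutually exclusive per-sample outcomes for a value v
def pvH (v : String) (tp : List String × List String) : Bool := decide (v ∈ tp.1 ∧ v ∈ tp.2)
def pvS (v : String) (tp : List String × List String) : Bool := decide (v ∈ tp.2 ∧ v ∉ tp.1)
def pvM (v : String) (tp : List String × List String) : Bool := decide (v ∈ tp.1 ∧ v ∉ tp.2)
def pvR (v : String) (tp : List String × List String) : Bool := decide (v ∉ tp.1 ∧ v ∉ tp.2)

-- A's inner loop counts exactly the four outcomes
lemma pvA_inner (v : String) (pairs : List (List String × List String)) (a b c d : Int) :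
    pairs.foldl (fun (acc : Int × Int × Int × Int) tp =>
          if v ∈ tp.1 ∧ v ∉ tp.2 then (acc.1, acc.2.1, acc.2.2.1 + 1, acc.2.2.2)
          else if v ∈ tp.2 ∧ v ∉ tp.1 then (acc.1, acc.2.1 + 1, acc.2.2.1, acc.2.2.2)
          else if v ∈ tp.1 then (acc.1 + 1, acc.2.1, acc.2.2.1, acc.2.2.2)
          else (acc.1, acc.2.1, acc.2.2.1, acc.2.2.2 + 1)) (a, b, c, d)
      = (a + (pairs.countP (pvH v) : Int), b + (pairs.countP (pvS v) : Int),
         c + (pairs.countP (pvM v) : Int), d + (pairs.countP (pvR v) : Int)) := by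
  induction pairs generalizing a b c d with
  | nil => simp
  | cons tp rest ih =>
    by_cases h1 : v ∈ tp.1 <;> by_cases h2 : v ∈ tp.2 <;>
      simp [List.foldl_cons, h1, h2, ih, pvH, pvS, pvM, pvR] <;> omega

-- the four outcomes partition the samples
lemma pvPartition (v : String) (pairs : List (List String × List String)) :
    pairs.countP (pvH v) + pairs.countP (pvS v) + pairs.countP (pvM v) + pairs.countP (pvR v)
      = pairs.length := by
  induction pairs with
  | nil => simp
  | cons tp rest ih =>
    by_cases h1 : v ∈ tp.1 <;> by_cases h2 : v ∈ tp.2 <;>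
      simp [pvH, pvS, pvM, pvR, h1, h2] <;> omega

-- looking one key up after a fold that inserts each element of a Nodup list once
lemma pvFold_insert_getD {ν : Type} (f : String → ν → ν) (z : ν) (v : String)
    (L : List String) (hL : L.Nodup) (d : PySem.Dict String ν) :
    (L.foldl (fun d w => d.insert w (f w (d.getD w z))) d).getD v z
      = if v ∈ L then f v (d.getD v z) else d.getD v z := by
  induction L generalizing d with
  | nil => simp
  | cons w L ih =>
    rcases List.nodup_cons.mp hL with ⟨hw, hnd⟩
    by_cases hv : v = w
    · subst hv
      simp [List.foldl_cons, ih hnd, hw, PySem.Dict.getD_insert_self]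
    · simp [List.foldl_cons, ih hnd, PySem.Dict.getD_insert_of_ne _ _ _ hv, hv]

-- B's per-sample stats update, seen through one key
lemma pvB_sample (acc : Int × PySem.Dict String (Int × Int × Int) × PySem.Dict (List String) (Int × Int))
    (tp : List String × List String) (v : String) :
    (pvBStep acc tp).2.1.getD v (0, 0, 0)
      = ((acc.2.1.getD v (0, 0, 0)).1 + (if pvH v tp then 1 else 0),
         (acc.2.1.getD v (0, 0, 0)).2.1 + (if pvS v tp then 1 else 0),
         (acc.2.1.getD v (0, 0, 0)).2.2 + (if pvM v tp then 1 else 0)) := by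
  show ((PySem.Set.union (PySem.Set.ofList tp.1) (PySem.Set.ofList tp.2)).foldl (fun d v =>
      let hsm := d.getD v (0, 0, 0)
      d.insert v (if v ∈ PySem.Set.ofList tp.1 ∧ v ∈ PySem.Set.ofList tp.2 then (hsm.1 + 1, hsm.2.1, hsm.2.2)
                  else if v ∈ PySem.Set.ofList tp.2 then (hsm.1, hsm.2.1 + 1, hsm.2.2)
                  else (hsm.1, hsm.2.1, hsm.2.2 + 1))) acc.2.1).getD v (0, 0, 0) = _
  have hnd : (PySem.Set.union (PySem.Set.ofList tp.1) (PySem.Set.ofList tp.2)).Nodup :=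
    PySem.Set.nodup_union _ _ (PySem.Set.nodup_ofList _)
  rw [pvFold_insert_getD
      (fun w hsm => if w ∈ PySem.Set.ofList tp.1 ∧ w ∈ PySem.Set.ofList tp.2 then (hsm.1 + 1, hsm.2.1, hsm.2.2)
                    else if w ∈ PySem.Set.ofList tp.2 then (hsm.1, hsm.2.1 + 1, hsm.2.2)
                    else (hsm.1, hsm.2.1, hsm.2.2 + 1)) (0, 0, 0) v _ hnd]
  by_cases h1 : v ∈ tp.1 <;> by_cases h2 : v ∈ tp.2 <;>
    simp [PySem.Set.mem_union, PySem.Set.mem_ofList, h1, h2, pvH, pvS, pvM]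

-- A's ac-loop body, for reuse on both sides
def pvAcStep (d : PySem.Dict (List String) (Int × Int)) (tp : List String × List String) :
    PySem.Dict (List String) (Int × Int) :=
  let ts := pvCanon tp.1
  let ps := pvCanon tp.2
  let ct := d.getD ts (0, 0)
  d.insert ts (ct.1 + (if ts = ps then 1 else 0), ct.2 + 1)

lemma pvB_fst (pairs : List (List String × List String))
    (acc : Int × PySem.Dict String (Int × Int × Int) × PySem.Dict (List String) (Int × Int)) :
    (pairs.foldl pvBStep acc).1 = acc.1 + pairs.length := by
  induction pairs generalizing acc with
  | nil => simp
  | cons tp rest ih =>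
    rw [List.foldl_cons, ih]
    show acc.1 + 1 + (rest.length : Int) = _
    rw [List.length_cons]
    push_cast; ring

lemma pvB_ac (pairs : List (List String × List String))
    (acc : Int × PySem.Dict String (Int × Int × Int) × PySem.Dict (List String) (Int × Int)) :
    (pairs.foldl pvBStep acc).2.2 = pairs.foldl pvAcStep acc.2.2 := by
  induction pairs generalizing acc with
  | nil => rfl
  | cons tp rest ih => rw [List.foldl_cons, ih]; rfl

lemma pvB_stats (pairs : List (List String × List String)) (v : String)
    (acc : Int × PySem.Dict String (Int × Int × Int) × PySem.Dict (List String) (Int × Int)) :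
    (pairs.foldl pvBStep acc).2.1.getD v (0, 0, 0)
      = ((acc.2.1.getD v (0, 0, 0)).1 + (pairs.countP (pvH v) : Int),
         (acc.2.1.getD v (0, 0, 0)).2.1 + (pairs.countP (pvS v) : Int),
         (acc.2.1.getD v (0, 0, 0)).2.2 + (pairs.countP (pvM v) : Int)) := by
  induction pairs generalizing acc with
  | nil => simp
  | cons tp rest ih =>
    rw [List.foldl_cons, ih, pvB_sample]
    by_cases hH : pvH v tp = true <;> by_cases hS : pvS v tp = true <;> by_cases hM : pvM v tp = true <;>
      simp [hH, hS, hM, Prod.ext_iff] <;> omega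

-- ===== VERDICT (by name: the statement is the Claim_ definition above) =====
theorem compute_errors_spec : Claim_equal_compute_errors := by
  intro y_test y_pred attributes _
  show compute_errors y_test y_pred attributes = compute_errors_alt y_test y_pred attributes
  unfold compute_errors compute_errors_alt
  refine Prod.ext ?_ ?_
  · -- ir_counter parts
    show (PySem.Dict.items (List.foldl _ PySem.Dict.empty attributes)) =
         (PySem.Dict.items (List.foldl _ PySem.Dict.empty attributes))
    congr 1
    refine PySem.List.foldl_congr_mem _ _ _ _ (fun d v _ => ?_)
    rw [pvA_inner, pvB_stats, pvB_fst]
    have hpart := pvPartition v (y_test.zip y_pred)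
    simp only [PySem.Dict.getD_empty]
    refine congrArg (d.insert v) ?_
    simp only [Prod.mk.injEq, zero_add]
    exact ⟨trivial, trivial, trivial, by omega⟩
  · -- ac_counter parts
    show (PySem.Dict.items (List.foldl _ PySem.Dict.empty (y_test.zip y_pred))) =
         (PySem.Dict.items ((List.foldl pvBStep _ (y_test.zip y_pred)).2.2))
    rw [pvB_ac]
    rfl
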